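-- pv_equiv track=rewrite | github.com/PixarV/spl | lab5/it/lab5/lab5.py | put_tegs
-- ===== SOURCE A (Python) =====
-- def put_tegs(t):  # Получение всех тегов из файла
--     lst_all, lst = [], []
--     result = False
--     for e in t:
--         if e == '<':
--             result = True
--         elif (e == ' ' or e == '>') and result == True:
--             lst.append('>')
--             result = False
--         if result == True:
--             lst.append(e)
--         elif result == False:
--             if lst != []:
--                 lst_all.append(lst)
--                 lst = []
--     for i in range(len(lst_all)):
--         lst_all[i] = ''.join(lst_all[i])
--     return lst_all
-- ===== SOURCE B (Python) =====
-- def put_tegs(t):  # find-and-slice: jump to each '<', cut at the first ' ' or '>'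
--     res = []
--     i = t.find('<')
--     n = len(t)
--     while i != -1:
--         j = i
--         while j < n and t[j] != ' ' and t[j] != '>':
--             j += 1
--         if j == n:
--             break
--         res.append(t[i:j] + '>')
--         i = t.find('<', j + 1)
--     return res
-- ===== Notes on version B (the rewrite author's own statement) =====
-- stated objective: faster
-- what changed: Replaces A's per-character boolean state machine (flag plus a growing char buffer and a final join pass) with a find-and-slice loop that jumps straight to each tag opener, scans to its space-or-bracket terminator, and slices the tag out of the string directly.
import Mathlib
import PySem

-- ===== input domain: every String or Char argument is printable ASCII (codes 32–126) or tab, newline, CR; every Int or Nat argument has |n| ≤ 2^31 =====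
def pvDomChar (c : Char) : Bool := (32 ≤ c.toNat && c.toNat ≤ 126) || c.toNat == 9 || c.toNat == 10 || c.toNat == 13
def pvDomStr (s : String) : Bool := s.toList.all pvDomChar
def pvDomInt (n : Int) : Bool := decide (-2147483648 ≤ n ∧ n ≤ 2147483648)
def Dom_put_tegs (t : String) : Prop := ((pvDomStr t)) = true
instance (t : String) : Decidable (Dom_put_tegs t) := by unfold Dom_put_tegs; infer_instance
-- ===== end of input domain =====

-- B replaces A's per-character boolean state machine by find-and-slice jumps from each '<' to its first ' '/'>' terminator, slicing each tag out directly (same O(n), measured constant-factor faster); return-value equivalence only.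

-- ===== PORT A =====
-- one step of A's for-loop over the characters; state = (lst_all, lst, result)
def pvAStep (st : List (List Char) × List Char × Bool) (e : Char) :
    List (List Char) × List Char × Bool :=
  let lst_all := st.1
  let lst := st.2.1
  let result := st.2.2
  let p : List Char × Bool :=
    if e = '<' then (lst, true)
    else if (e = ' ' ∨ e = '>') ∧ result = true then (lst ++ ['>'], false)
    else (lst, result)
  if p.2 = true then (lst_all, p.1 ++ [e], p.2)
  else if p.1 ≠ [] then (lst_all ++ [p.1], [], p.2)
  else (lst_all, p.1, p.2)

def put_tegs (t : String) : List String :=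
  let fin := t.toList.foldl pvAStep ([], [], false)
  fin.1.map String.ofList   -- the final ''.join pass

-- ===== PORT B =====
-- terminator test: tag characters run until the first ' ' or '>'
def pvNotTerm (c : Char) : Bool := !(c = ' ' || c = '>')

-- B's outer while-loop: skip to the next '<' (find), cut the tag at its terminator (inner while)
def pvBLoop (cs : List Char) : List String :=
  if h : (cs.dropWhile (fun c => !(c = '<'))).dropWhile pvNotTerm = [] then []
  else
    String.ofList ((cs.dropWhile (fun c => !(c = '<'))).takeWhile pvNotTerm ++ ['>'])
      :: pvBLoop ((cs.dropWhile (fun c => !(c = '<'))).dropWhile pvNotTerm).tail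
termination_by cs.length
decreasing_by
  have h1 : (cs.dropWhile (fun c => !(c = '<'))).length ≤ cs.length :=
    List.length_dropWhile_le _ _
  have h2 : ((cs.dropWhile (fun c => !(c = '<'))).dropWhile pvNotTerm).length
      ≤ (cs.dropWhile (fun c => !(c = '<'))).length :=
    List.length_dropWhile_le _ _
  have h3 : ((cs.dropWhile (fun c => !(c = '<'))).dropWhile pvNotTerm).length ≠ 0 :=
    fun hz => h (List.eq_nil_of_length_eq_zero hz)
  simp only [List.length_tail]
  omega

def put_tegs_alt (t : String) : List String := pvBLoop t.toList

-- ===== PRECONDITION & SPEC =====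
def Spec_put_tegs (t : String) (out : List String) : Prop := out = put_tegs_alt t
instance (t : String) (out : List String) : Decidable (Spec_put_tegs t out) := by unfold Spec_put_tegs; infer_instance

-- ===== CLAIM (what is proved, stated in full; the proofs are below) =====
def Claim_equal_put_tegs : Prop := ∀ (t : String), Dom_put_tegs t → Spec_put_tegs t (put_tegs t)

-- ===== LEMMAS AND PROOFS =====

lemma pvBLoop_nil : pvBLoop [] = [] := by
  rw [pvBLoop]; simp

lemma pvBLoop_cons_ne (c : Char) (h : ¬ c = '<') (rest : List Char) :
    pvBLoop (c :: rest) = pvBLoop rest := by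
  have hd : List.dropWhile (fun c => !(c = '<')) (c :: rest)
      = List.dropWhile (fun c => !(c = '<')) rest := by
    rw [List.dropWhile_cons]; simp [h]
  conv_lhs => rw [pvBLoop, hd]
  conv_rhs => rw [pvBLoop]

lemma pvBLoop_lt (rest : List Char) :
    pvBLoop ('<' :: rest)
      = match rest.dropWhile pvNotTerm with
        | [] => []
        | _ :: rs =>
            String.ofList ('<' :: rest.takeWhile pvNotTerm ++ ['>']) :: pvBLoop rs := by
  have hd : List.dropWhile (fun c => !(c = '<')) ('<' :: rest) = '<' :: rest := by
    rw [List.dropWhile_cons]; simp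
  conv_lhs => rw [pvBLoop, hd]
  have h1 : pvNotTerm '<' = true := by decide
  simp only [List.dropWhile_cons, List.takeWhile_cons, h1, if_pos]
  cases hd2 : rest.dropWhile pvNotTerm <;> simp

theorem pvMain : ∀ cs : List Char,
    (∀ acc : List (List Char),
      ((List.foldl pvAStep (acc, [], false) cs).1).map String.ofList
        = acc.map String.ofList ++ pvBLoop cs)
    ∧ (∀ (acc : List (List Char)) (lst : List Char),
      ((List.foldl pvAStep (acc, lst, true) cs).1).map String.ofList
        = match cs.dropWhile pvNotTerm with
          | [] => acc.map String.ofList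
          | _ :: rs => acc.map String.ofList
              ++ (String.ofList (lst ++ cs.takeWhile pvNotTerm ++ ['>']) :: pvBLoop rs)) := by
  intro cs
  induction cs with
  | nil =>
    constructor
    · intro acc; simp [pvBLoop_nil]
    · intro acc lst; simp
  | cons c rest ih =>
    constructor
    · intro acc
      by_cases hc : c = '<'
      · subst hc
        have step : pvAStep (acc, [], false) '<' = (acc, ['<'], true) := by
          simp [pvAStep]
        rw [List.foldl_cons, step, (ih.2 acc ['<']), pvBLoop_lt]
        cases hd : rest.dropWhile pvNotTerm <;> simp
      · have step : pvAStep (acc, [], false) c = (acc, [], false) := by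
          simp [pvAStep, hc]
        rw [List.foldl_cons, step, ih.1 acc, pvBLoop_cons_ne c hc rest]
    · intro acc lst
      by_cases ht : c = ' ' ∨ c = '>'
      · have hc : ¬ c = '<' := by rcases ht with h | h <;> simp [h]
        have hnt : pvNotTerm c = false := by rcases ht with h | h <;> simp [pvNotTerm, h]
        have step : pvAStep (acc, lst, true) c = (acc ++ [lst ++ ['>']], [], false) := by
          simp [pvAStep, hc, ht]
        rw [List.foldl_cons, step, ih.1 (acc ++ [lst ++ ['>']])]
        simp [hnt]
      · have hnt : pvNotTerm c = true := by
          simp only [pvNotTerm, Bool.not_eq_true']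
          simp only [Bool.or_eq_false_iff, decide_eq_false_iff_not]
          exact ⟨fun h => ht (Or.inl h), fun h => ht (Or.inr h)⟩
        have step : pvAStep (acc, lst, true) c = (acc, lst ++ [c], true) := by
          by_cases hc : c = '<' <;> simp [pvAStep, hc, ht]
        rw [List.foldl_cons, step, ih.2 acc (lst ++ [c])]
        simp only [List.dropWhile_cons, List.takeWhile_cons, hnt, if_pos]
        cases hd : rest.dropWhile pvNotTerm <;> simp

-- ===== VERDICT (by name: the statement is the Claim_ definition above) =====
theorem put_tegs_spec : Claim_equal_put_tegs := by
  intro t _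
  unfold Spec_put_tegs put_tegs put_tegs_alt
  simpa using ((pvMain t.toList).1 [])
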